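-- pv_equiv track=rewrite | github.com/WiktorB2004/Rozwiazania-Arkuszy-Maturalnych | 2022/Zadanie4.py | find_good_5set
-- ===== SOURCE A (Python) =====
-- def find_good_5set(numlist: list):
--     numlist = list(map(int, numlist))
--     res = []
--     count = 0
--     for u in numlist:
--         for w in range(2,10000):
--             tmp1 = u*w
--             if tmp1 in numlist:
--                 for x in range(2,10000):
--                     tmp2 = tmp1 * x
--                     if tmp2 in numlist:
--                         for y in range(2,10000):
--                             tmp3 = tmp2 * y
--                             if tmp3 in numlist:
--                                 for z in range(2,10000):
--                                     tmp4 = tmp3 * z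
--                                     if tmp4 in numlist:
--                                         if len(set([u,tmp1,tmp2,tmp3,tmp4])) == 5:
--                                             res.append([u,tmp1,tmp2,tmp3,tmp4])
--                                             count += 1
--                                     if tmp4 > max(numlist):
--                                         break
--                             if tmp3 > max(numlist):
--                                 break
--                     if tmp2 > max(numlist):
--                         break
--             if tmp1 > max(numlist):
--                 break
--
--     return res, count
-- ===== SOURCE B (Python) =====
-- def find_good_5set(numlist: list):
--     numlist = list(map(int, numlist))
--     distinct = list(dict.fromkeys(numlist))
--
--     def succs(v):
--         if v == 0:
--             return []
--         return sorted((m for m in distinct if m % v == 0 and 2 <= m // v <= 9999),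
--                       key=lambda m: m // v)
--
--     res = []
--     count = 0
--     for u in numlist:
--         for b in succs(u):
--             for c in succs(b):
--                 for d in succs(c):
--                     for e in succs(d):
--                         if len(set([u, b, c, d, e])) == 5:
--                             res.append([u, b, c, d, e])
--                             count += 1
--     return res, count
-- ===== Notes on version B (the rewrite author's own statement) =====
-- stated objective: faster
-- what changed: Instead of enumerating all factors 2..9999 at each of four nested levels with linear membership scans, B deduplicates the input once and, per node, builds its successor list (elements that are a multiple of it by a factor 2..9999, sorted by factor) so the chain search walks only elements actually present.
import Mathlib
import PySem

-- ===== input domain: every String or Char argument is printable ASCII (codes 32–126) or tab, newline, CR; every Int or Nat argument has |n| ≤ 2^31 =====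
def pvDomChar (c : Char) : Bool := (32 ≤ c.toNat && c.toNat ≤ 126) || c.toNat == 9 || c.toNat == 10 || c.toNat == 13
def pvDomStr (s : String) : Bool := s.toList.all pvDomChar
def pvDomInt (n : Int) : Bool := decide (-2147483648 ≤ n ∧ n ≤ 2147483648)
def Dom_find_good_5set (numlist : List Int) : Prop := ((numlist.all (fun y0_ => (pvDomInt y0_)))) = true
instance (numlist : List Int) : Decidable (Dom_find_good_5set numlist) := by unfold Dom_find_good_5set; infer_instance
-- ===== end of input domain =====

-- B replaces A's enumeration of all factors 2..9999 at every level by successor lists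
-- (multiples present in the deduplicated input, sorted by factor); return value only.

-- ===== PORT A =====
-- max(numlist); total form — A only evaluates it when numlist is nonempty (inside the loop over u)
def pyMaxA (L : List Int) : Int := (PySem.List.max? L (fun x => x)).getD 0

def loopZ (L : List Int) (u t1 t2 t3 : Int) : List Int → List (List Int) × Int → List (List Int) × Int
  | [], acc => acc
  | z :: rest, acc =>
    let t4 := t3 * z
    let acc' := if t4 ∈ L then
        (if (PySem.Set.ofList [u, t1, t2, t3, t4]).length = 5
          then (acc.1 ++ [[u, t1, t2, t3, t4]], acc.2 + 1) else acc)
      else acc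
    if t4 > pyMaxA L then acc' else loopZ L u t1 t2 t3 rest acc'

def loopY (L : List Int) (u t1 t2 : Int) : List Int → List (List Int) × Int → List (List Int) × Int
  | [], acc => acc
  | y :: rest, acc =>
    let t3 := t2 * y
    let acc' := if t3 ∈ L then loopZ L u t1 t2 t3 (PySem.List.pyRange 2 10000 1) acc else acc
    if t3 > pyMaxA L then acc' else loopY L u t1 t2 rest acc'

def loopX (L : List Int) (u t1 : Int) : List Int → List (List Int) × Int → List (List Int) × Int
  | [], acc => acc
  | x :: rest, acc =>
    let t2 := t1 * x
    let acc' := if t2 ∈ L then loopY L u t1 t2 (PySem.List.pyRange 2 10000 1) acc else acc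
    if t2 > pyMaxA L then acc' else loopX L u t1 rest acc'

def loopW (L : List Int) (u : Int) : List Int → List (List Int) × Int → List (List Int) × Int
  | [], acc => acc
  | w :: rest, acc =>
    let t1 := u * w
    let acc' := if t1 ∈ L then loopX L u t1 (PySem.List.pyRange 2 10000 1) acc else acc
    if t1 > pyMaxA L then acc' else loopW L u rest acc'

def find_good_5set (numlist : List Int) : List (List Int) × Int :=
  numlist.foldl (fun acc u => loopW numlist u (PySem.List.pyRange 2 10000 1) acc) ([], 0)

-- ===== PORT B =====
-- successors of v inside the deduplicated input: multiples of v by a factor 2..9999, sorted by factor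
def succsB (distinct : List Int) (v : Int) : List Int :=
  if v = 0 then []
  else PySem.List.sorted
    (distinct.filter (fun m => decide (PySem.Int.mod m v = 0) &&
        decide (2 ≤ PySem.Int.floordiv m v) && decide (PySem.Int.floordiv m v ≤ 9999)))
    (fun m => PySem.Int.floordiv m v)

def find_good_5set_alt (numlist : List Int) : List (List Int) × Int :=
  let distinct := PySem.List.dedup numlist
  numlist.foldl (fun acc u =>
    (succsB distinct u).foldl (fun acc b =>
      (succsB distinct b).foldl (fun acc c =>
        (succsB distinct c).foldl (fun acc d =>
          (succsB distinct d).foldl (fun acc e =>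
            if (PySem.Set.ofList [u, b, c, d, e]).length = 5
              then (acc.1 ++ [[u, b, c, d, e]], acc.2 + 1) else acc) acc) acc) acc) acc) ([], 0)

-- ===== PRECONDITION & SPEC =====
def Spec_find_good_5set (numlist : List Int) (out : List (List Int) × Int) : Prop := out = find_good_5set_alt numlist
instance (numlist : List Int) (out : List (List Int) × Int) : Decidable (Spec_find_good_5set numlist out) := by unfold Spec_find_good_5set; infer_instance

-- ===== CLAIM (what is proved, stated in full; the proofs are below) =====
def Claim_equal_find_good_5set : Prop := ∀ (numlist : List Int), Dom_find_good_5set numlist → Spec_find_good_5set numlist (find_good_5set numlist)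

-- ===== LEMMAS AND PROOFS =====

lemma le_pyMaxA {L : List Int} {a : Int} (ha : a ∈ L) : a ≤ pyMaxA L := by
  unfold pyMaxA
  cases h : PySem.List.max? L (fun x => x) with
  | none =>
      rw [PySem.List.max?_eq_none_iff] at h
      subst h; simp at ha
  | some m => simpa using PySem.List.max?_isMax h a ha

lemma fd_mul (v w : Int) (hv : v ≠ 0) : PySem.Int.floordiv (v * w) v = w :=
  Int.mul_fdiv_cancel_left w hv

-- the list of successors in the order A's factor loop meets them
def candL (L : List Int) (v : Int) : List Int :=
  ((PySem.List.pyRange 2 10000 1).filter (fun w => decide (v * w ∈ L))).map (fun w => v * w)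

lemma mem_candL {L : List Int} {v a : Int} :
    a ∈ candL L v ↔ ∃ w : Int, 2 ≤ w ∧ w < 10000 ∧ v * w ∈ L ∧ a = v * w := by
  unfold candL
  simp only [List.mem_map, List.mem_filter, PySem.List.mem_pyRange_one, decide_eq_true_eq]
  constructor
  · rintro ⟨w, ⟨⟨h2, h10⟩, hmem⟩, rfl⟩; exact ⟨w, h2, h10, hmem, rfl⟩
  · rintro ⟨w, h2, h10, hmem, rfl⟩; exact ⟨w, ⟨⟨h2, h10⟩, hmem⟩, rfl⟩

lemma succsB_eq_cand (L : List Int) (v : Int) (hv : v ≠ 0) :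
    succsB (PySem.List.dedup L) v = candL L v := by
  unfold succsB
  rw [if_neg hv]
  apply PySem.List.sorted_eq_of_perm_of_pairwise_lt
  · -- candL is a permutation of the filtered dedup list
    rw [List.perm_ext_iff_of_nodup]
    · intro a
      rw [mem_candL, List.mem_filter]
      simp only [PySem.List.dedup, PySem.Set.mem_ofList, Bool.and_eq_true, decide_eq_true_eq,
        PySem.Int.mod_eq_zero_iff_dvd]
      constructor
      · rintro ⟨w, h2, h10, hmem, rfl⟩
        refine ⟨hmem, ⟨⟨⟨w, rfl⟩, ?_⟩, ?_⟩⟩ <;> rw [fd_mul v w hv] <;> omega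
      · rintro ⟨hmem, ⟨⟨⟨c, rfl⟩, h2⟩, h9⟩⟩
        rw [fd_mul v c hv] at h2 h9
        exact ⟨c, h2, by omega, hmem, rfl⟩
    · -- candL has no duplicates
      apply List.Nodup.map
      · intro x y hxy
        exact Int.eq_of_mul_eq_mul_left hv hxy
      · exact (PySem.List.nodup_pyRange_one 2 10000).filter _
    · exact List.Nodup.filter _ (PySem.Set.nodup_ofList L)
  · -- candL is strictly increasing under the key m // v
    unfold candL
    rw [List.pairwise_map]
    refine ((PySem.List.pairwise_lt_pyRange_one 2 10000).filter _).imp ?_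
    intro a b hab
    rw [fd_mul v a hv, fd_mul v b hv]
    exact hab

-- generic shape of one of A's factor loops
def gloop (L : List Int) (v : Int)
    (inner : Int → List (List Int) × Int → List (List Int) × Int) :
    List Int → List (List Int) × Int → List (List Int) × Int
  | [], acc => acc
  | w :: rest, acc =>
    let acc' := if v * w ∈ L then inner (v * w) acc else acc
    if v * w > pyMaxA L then acc' else gloop L v inner rest acc'

lemma gloop_eq (L : List Int) (v : Int)
    (inner : Int → List (List Int) × Int → List (List Int) × Int)
    (hv : v ≠ 0) (hvL : v ∈ L) :
    ∀ (ws : List Int) (acc : List (List Int) × Int), ws.Pairwise (· < ·) → (∀ w ∈ ws, (2:Int) ≤ w) →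
      gloop L v inner ws acc
        = ((ws.filter (fun w => decide (v * w ∈ L))).map (fun w => v * w)).foldl
            (fun a m => inner m a) acc
  | [], acc, _, _ => rfl
  | w :: rest, acc, hp, h2 => by
    simp only [gloop, List.filter_cons]
    by_cases hb : v * w > pyMaxA L
    · have hw2 : (2:Int) ≤ w := h2 w (by simp)
      have hvM : v ≤ pyMaxA L := le_pyMaxA hvL
      have hvpos : 0 < v := by nlinarith
      have hrest : rest.filter (fun w' => decide (v * w' ∈ L)) = [] := by
        rw [List.filter_eq_nil_iff]
        intro w' hw'
        simp only [decide_eq_true_eq]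
        intro hmem
        have h1 : v * w' ≤ pyMaxA L := le_pyMaxA hmem
        have hlt : w < w' := (List.pairwise_cons.mp hp).1 w' hw'
        nlinarith
      rw [if_pos hb, hrest]
      by_cases hm : v * w ∈ L <;> simp [hm]
    · rw [if_neg hb,
        gloop_eq L v inner hv hvL rest _ (List.pairwise_cons.mp hp).2
          (fun x hx => h2 x (List.mem_cons_of_mem _ hx))]
      by_cases hm : v * w ∈ L <;> simp [hm]

-- when the pivot is 0, every iteration produces 0 and leaves the accumulator unchanged
lemma gloop_zero (L : List Int)
    (inner : Int → List (List Int) × Int → List (List Int) × Int)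
    (h : ∀ a, inner 0 a = a) :
    ∀ (ws : List Int) (acc : List (List Int) × Int), gloop L 0 inner ws acc = acc
  | [], _ => rfl
  | w :: rest, acc => by
    simp only [gloop, Int.zero_mul, h]
    rw [gloop_zero L inner h rest]
    split_ifs <;> rfl

-- each of A's four loops is an instance of gloop
lemma loopZ_eq_gloop (L : List Int) (u t1 t2 t3 : Int) :
    ∀ (zs : List Int) (acc : List (List Int) × Int),
      loopZ L u t1 t2 t3 zs acc
        = gloop L t3 (fun t4 a =>
            if (PySem.Set.ofList [u, t1, t2, t3, t4]).length = 5
              then (a.1 ++ [[u, t1, t2, t3, t4]], a.2 + 1) else a) zs acc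
  | [], _ => rfl
  | z :: rest, acc => by
    simp only [loopZ, gloop]
    rw [loopZ_eq_gloop L u t1 t2 t3 rest]

lemma loopY_eq_gloop (L : List Int) (u t1 t2 : Int) :
    ∀ (ys : List Int) (acc : List (List Int) × Int),
      loopY L u t1 t2 ys acc
        = gloop L t2 (fun t3 a => loopZ L u t1 t2 t3 (PySem.List.pyRange 2 10000 1) a) ys acc
  | [], _ => rfl
  | y :: rest, acc => by
    simp only [loopY, gloop]
    rw [loopY_eq_gloop L u t1 t2 rest]

lemma loopX_eq_gloop (L : List Int) (u t1 : Int) :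
    ∀ (xs : List Int) (acc : List (List Int) × Int),
      loopX L u t1 xs acc
        = gloop L t1 (fun t2 a => loopY L u t1 t2 (PySem.List.pyRange 2 10000 1) a) xs acc
  | [], _ => rfl
  | x :: rest, acc => by
    simp only [loopX, gloop]
    rw [loopX_eq_gloop L u t1 rest]

lemma loopW_eq_gloop (L : List Int) (u : Int) :
    ∀ (ws : List Int) (acc : List (List Int) × Int),
      loopW L u ws acc
        = gloop L u (fun t1 a => loopX L u t1 (PySem.List.pyRange 2 10000 1) a) ws acc
  | [], _ => rfl
  | w :: rest, acc => by
    simp only [loopW, gloop]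
    rw [loopW_eq_gloop L u rest]

-- the all-zero chain: each level leaves the accumulator unchanged (the set {0,0,0,0,0} has size 1)
lemma loopZ_zero (L : List Int) (zs : List Int) (acc : List (List Int) × Int) :
    loopZ L 0 0 0 0 zs acc = acc := by
  rw [loopZ_eq_gloop]
  exact gloop_zero L _ (fun a => by rw [if_neg (by decide)]) zs acc

lemma loopY_zero (L : List Int) (ys : List Int) (acc : List (List Int) × Int) :
    loopY L 0 0 0 ys acc = acc := by
  rw [loopY_eq_gloop]
  exact gloop_zero L _ (fun a => loopZ_zero L _ a) ys acc

lemma loopX_zero (L : List Int) (xs : List Int) (acc : List (List Int) × Int) :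
    loopX L 0 0 xs acc = acc := by
  rw [loopX_eq_gloop]
  exact gloop_zero L _ (fun a => loopY_zero L _ a) xs acc

lemma loopW_zero (L : List Int) (ws : List Int) (acc : List (List Int) × Int) :
    loopW L 0 ws acc = acc := by
  rw [loopW_eq_gloop]
  exact gloop_zero L _ (fun a => loopX_zero L _ a) ws acc

lemma gloop_range (L : List Int) (v : Int)
    (inner : Int → List (List Int) × Int → List (List Int) × Int)
    (hv : v ≠ 0) (hvL : v ∈ L) (acc : List (List Int) × Int) :
    gloop L v inner (PySem.List.pyRange 2 10000 1) acc
      = (succsB (PySem.List.dedup L) v).foldl (fun a m => inner m a) acc := by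
  rw [succsB_eq_cand L v hv]
  exact gloop_eq L v inner hv hvL _ acc (PySem.List.pairwise_lt_pyRange_one 2 10000)
    (fun w hw => (PySem.List.mem_pyRange_one.mp hw).1)

lemma mem_succsB {L : List Int} {v a : Int} (h : a ∈ succsB (PySem.List.dedup L) v) : a ∈ L := by
  unfold succsB at h
  by_cases hv : v = 0
  · rw [if_pos hv] at h; simp at h
  · rw [if_neg hv, PySem.List.mem_sorted, List.mem_filter] at h
    have := h.1
    simpa only [PySem.List.dedup, PySem.Set.mem_ofList] using this

-- elements of a successor list are never 0 (their factor m // v is ≥ 2)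
lemma succsB_ne_zero {d : List Int} {v a : Int} (h : a ∈ succsB d v) : a ≠ 0 := by
  unfold succsB at h
  by_cases hv : v = 0
  · rw [if_pos hv] at h; simp at h
  · rw [if_neg hv, PySem.List.mem_sorted, List.mem_filter] at h
    have h2 := h.2
    simp only [Bool.and_eq_true, decide_eq_true_eq] at h2
    intro ha
    subst ha
    have : PySem.Int.floordiv 0 v = 0 := Int.zero_fdiv v
    omega

lemma level1 (L : List Int) (u t1 t2 v : Int) (hv : v ≠ 0) (hvL : v ∈ L)
    (acc : List (List Int) × Int) :
    loopZ L u t1 t2 v (PySem.List.pyRange 2 10000 1) acc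
      = (succsB (PySem.List.dedup L) v).foldl (fun a e =>
          if (PySem.Set.ofList [u, t1, t2, v, e]).length = 5
            then (a.1 ++ [[u, t1, t2, v, e]], a.2 + 1) else a) acc := by
  rw [loopZ_eq_gloop, gloop_range L v _ hv hvL]

lemma level2 (L : List Int) (u t1 v : Int) (hv : v ≠ 0) (hvL : v ∈ L)
    (acc : List (List Int) × Int) :
    loopY L u t1 v (PySem.List.pyRange 2 10000 1) acc
      = (succsB (PySem.List.dedup L) v).foldl (fun a d =>
          (succsB (PySem.List.dedup L) d).foldl (fun a e =>
            if (PySem.Set.ofList [u, t1, v, d, e]).length = 5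
              then (a.1 ++ [[u, t1, v, d, e]], a.2 + 1) else a) a) acc := by
  rw [loopY_eq_gloop, gloop_range L v _ hv hvL]
  exact PySem.List.foldl_congr_mem _ _ _ _
    (fun a m hm => level1 L u t1 v m (succsB_ne_zero hm) (mem_succsB hm) a)

lemma level3 (L : List Int) (u v : Int) (hv : v ≠ 0) (hvL : v ∈ L)
    (acc : List (List Int) × Int) :
    loopX L u v (PySem.List.pyRange 2 10000 1) acc
      = (succsB (PySem.List.dedup L) v).foldl (fun a c =>
          (succsB (PySem.List.dedup L) c).foldl (fun a d =>
            (succsB (PySem.List.dedup L) d).foldl (fun a e =>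
              if (PySem.Set.ofList [u, v, c, d, e]).length = 5
                then (a.1 ++ [[u, v, c, d, e]], a.2 + 1) else a) a) a) acc := by
  rw [loopX_eq_gloop, gloop_range L v _ hv hvL]
  exact PySem.List.foldl_congr_mem _ _ _ _
    (fun a m hm => level2 L u v m (succsB_ne_zero hm) (mem_succsB hm) a)

lemma level4 (L : List Int) (v : Int) (hvL : v ∈ L) (acc : List (List Int) × Int) :
    loopW L v (PySem.List.pyRange 2 10000 1) acc
      = (succsB (PySem.List.dedup L) v).foldl (fun a b =>
          (succsB (PySem.List.dedup L) b).foldl (fun a c =>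
            (succsB (PySem.List.dedup L) c).foldl (fun a d =>
              (succsB (PySem.List.dedup L) d).foldl (fun a e =>
                if (PySem.Set.ofList [v, b, c, d, e]).length = 5
                  then (a.1 ++ [[v, b, c, d, e]], a.2 + 1) else a) a) a) a) acc := by
  by_cases hv : v = 0
  · subst hv
    rw [loopW_zero]
    simp [succsB]
  · rw [loopW_eq_gloop, gloop_range L v _ hv hvL]
    exact PySem.List.foldl_congr_mem _ _ _ _
      (fun a m hm => level3 L v m (succsB_ne_zero hm) (mem_succsB hm) a)

-- ===== VERDICT (by name: the statement is the Claim_ definition above) =====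
theorem find_good_5set_spec : Claim_equal_find_good_5set := by
  intro L _
  unfold Spec_find_good_5set find_good_5set find_good_5set_alt
  exact PySem.List.foldl_congr_mem _ _ _ _ (fun a u hu => level4 L u hu a)
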